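-- pv_equiv track=rewrite | github.com/YangXinNewlife/LeetCode | easy/replace_all_digits_with_characters_1844.py | replaceDigits
-- ===== SOURCE A (Python) =====
-- def replaceDigits(s: str) -> str:
--     result = ""
--     for i in range(len(s)):
--         if i % 2 == 0:
--             result += s[i]
--         else:
--             result += chr(ord(s[i-1]) + int(s[i]))
--     return result
-- ===== SOURCE B (Python) =====
-- def replaceDigits(s: str) -> str:
--     it = iter(s)
--     out = []
--     for a in it:
--         out.append(a)
--         d = next(it, '')
--         if d:
--             out.append(chr(ord(a) + int(d)))
--     return ''.join(out)
-- ===== Notes on version B (the rewrite author's own statement) =====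
-- stated objective: alternative
-- what changed: B consumes the string two characters at a time as (letter, digit) pairs via an iterator, with no index arithmetic and no parity test, appending to a list joined once, instead of A's per-index loop with an i%2 branch, s[i-1] back-reference and repeated string concatenation.
import Mathlib
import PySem

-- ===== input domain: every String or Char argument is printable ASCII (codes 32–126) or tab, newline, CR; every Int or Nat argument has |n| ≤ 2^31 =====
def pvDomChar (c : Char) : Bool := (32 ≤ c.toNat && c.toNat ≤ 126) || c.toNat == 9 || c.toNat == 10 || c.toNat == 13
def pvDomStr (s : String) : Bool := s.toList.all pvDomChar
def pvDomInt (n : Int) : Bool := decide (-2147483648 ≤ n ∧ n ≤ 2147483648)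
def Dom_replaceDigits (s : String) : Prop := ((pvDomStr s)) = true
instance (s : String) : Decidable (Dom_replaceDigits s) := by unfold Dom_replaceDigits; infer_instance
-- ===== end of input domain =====

-- B consumes the string pairwise (letter, digit) with no index arithmetic or parity test,
-- instead of A's per-index loop with an i%2 branch; alternative decomposition, same cost.


-- chr(ord(a) + int(d)) — identical subexpression of both Pythons
def pyShift (a d : Char) : Char :=
  Char.ofNat (((a.toNat : Int) + (PySem.Int.ofStr? (String.mk [d])).getD 0).toNat)

-- ===== PORT A =====
-- for i in range(len(s)): even i appends s[i], odd i appends chr(ord(s[i-1]) + int(s[i]))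
def replaceDigits (s : String) : String :=
  String.mk ((List.range s.toList.length).foldl
    (fun result i =>
      if i % 2 == 0 then result ++ [s.toList.getD i ' ']
      else result ++ [pyShift (s.toList.getD (i - 1) ' ') (s.toList.getD i ' ')]) [])

-- ===== PORT B =====
-- the iterator loop of Source B: take a letter, then (if present) its digit, recurse on the rest
def altGo : List Char → List Char
  | [] => []
  | [a] => [a]
  | a :: d :: rest => a :: pyShift a d :: altGo rest

def replaceDigits_alt (s : String) : String := String.mk (altGo s.toList)

-- ===== PRECONDITION & SPEC =====
-- Pre_ excludes inputs where Python A raises ValueError: some odd-index character is not a digit.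
def Pre_replaceDigits (s : String) : Prop :=
  ∀ i, i < s.toList.length → i % 2 = 1 → (s.toList.getD i ' ').isDigit = true
instance (s : String) : Decidable (Pre_replaceDigits s) := by unfold Pre_replaceDigits; infer_instance
def pvWitness_replaceDigits : String := "a1c1e1"

def Spec_replaceDigits (s : String) (out : String) : Prop := out = replaceDigits_alt s
instance (s : String) (out : String) : Decidable (Spec_replaceDigits s out) := by unfold Spec_replaceDigits; infer_instance

-- ===== CLAIM (what is proved, stated in full; the proofs are below) =====
def Claim_equal_replaceDigits : Prop := ∀ (s : String), Dom_replaceDigits s → Pre_replaceDigits s → Spec_replaceDigits s (replaceDigits s)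

-- ===== LEMMAS AND PROOFS =====

-- A's two-branch append loop, refactored through map
theorem foldl_append_ite {α β : Type} (p : α → Bool) (f g : α → β) (l : List α) (acc : List β) :
    l.foldl (fun acc x => if p x then acc ++ [f x] else acc ++ [g x]) acc =
      acc ++ l.map (fun x => if p x then f x else g x) := by
  induction l generalizing acc with
  | nil => simp
  | cons x l ih => by_cases hp : p x <;> simp [hp, ih]

-- the character A's loop emits at index i of cs
def aEmit (cs : List Char) (i : Nat) : Char :=
  if i % 2 == 0 then cs.getD i ' ' else pyShift (cs.getD (i - 1) ' ') (cs.getD i ' ')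

theorem aEmit_shift (a d : Char) (r : List Char) (i : Nat) :
    aEmit (a :: d :: r) (i + 2) = aEmit r i := by
  unfold aEmit
  rcases i with _ | j
  · simp
  · have h2 : j + 1 + 2 = (j + 2) + 1 := by omega
    rcases Nat.mod_two_eq_zero_or_one (j + 1) with hp | hp
    · have hp'' : (j + 1 + 2) % 2 = 0 := by omega
      simp [hp, hp'', h2]
    · have hp' : ((j + 1) % 2 == 0) = false := by simp [hp]
      have hp'' : ((j + 1 + 2) % 2 == 0) = false := by
        simp [Nat.add_mod_right, hp]
      simp [hp', hp'', h2]

theorem range_map_aEmit (cs : List Char) :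
    (List.range cs.length).map (aEmit cs) = altGo cs := by
  induction cs using altGo.induct with
  | case1 => simp [altGo]
  | case2 a => simp [altGo, aEmit]
  | case3 a d r ih =>
    have hlen : (a :: d :: r).length = 2 + r.length := by simp; omega
    rw [altGo, hlen, List.range_add, List.map_append, List.map_map]
    have h2 : (List.range 2).map (aEmit (a :: d :: r)) = [a, pyShift a d] := by
      simp [List.range_succ, aEmit]
    rw [h2]
    have hcongr : (List.range r.length).map (aEmit (a :: d :: r) ∘ (2 + ·)) =
        (List.range r.length).map (aEmit r) := by
      refine List.map_congr_left fun i _ => ?_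
      have : 2 + i = i + 2 := by omega
      simp [Function.comp, this, aEmit_shift]
    rw [hcongr, ih]
    rfl

-- ===== VERDICT (by name: the statement is the Claim_ definition above) =====
theorem replaceDigits_spec : Claim_equal_replaceDigits := by
  intro s _ _
  unfold Spec_replaceDigits replaceDigits replaceDigits_alt
  rw [foldl_append_ite]
  exact congrArg String.mk (range_map_aEmit s.toList)
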